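-- pv_equiv track=rewrite | github.com/rosshemsley/iOpener | matching.py | get_lcs_completion_or_none
-- ===== SOURCE A (Python) =====
-- def get_lcs_completion_or_none(filename, directory_listing):
--     """
--     If there is a unique way to complete the path such that the LCS is the same
--     as the query string, return that (similar to the way Fish shell works)
--     """
--     completion = None
--
--     for candidate in directory_listing:
--         if lcs(filename, candidate) == filename:
--             if completion is not None:
--                 return None
--             else:
--                 completion = candidate
--
--     return completion
--
-- def lcs(A, B):
--     """
--     Taken and adapted from
--     http://rosettacode.org/wiki/Longest_common_subsequence#Dynamic_Programming_7
--     """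
--     lengths = [[0 for j in range(len(B) + 1)] for i in range(len(A) + 1)]
--
--     for i, x in enumerate(A):
--         for j, y in enumerate(B):
--             if x == y:
--                 lengths[i + 1][j + 1] = lengths[i][j] + 1
--             else:
--                 lengths[i + 1][j + 1] = max(lengths[i + 1][j], lengths[i][j + 1])
--
--     result = ""
--     x, y = len(A), len(B)
--     while x != 0 and y != 0:
--         if lengths[x][y] == lengths[x - 1][y]:
--             x -= 1
--         elif lengths[x][y] == lengths[x][y - 1]:
--             y -= 1
--         else:
--             result = A[x - 1] + result
--             x -= 1
--             y -= 1
--     return result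
-- ===== SOURCE B (Python) =====
-- def _is_subsequence(needle, haystack):
--     i = 0
--     n = len(needle)
--     for ch in haystack:
--         if i < n and needle[i] == ch:
--             i += 1
--     return i == n
--
-- def get_lcs_completion_or_none(filename, directory_listing):
--     matches = [c for c in directory_listing if _is_subsequence(filename, c)]
--     return matches[0] if len(matches) == 1 else None
-- ===== Notes on version B (the rewrite author's own statement) =====
-- stated objective: faster
-- what changed: The O(|f|*|c|) LCS dynamic-programming table plus backtracking is replaced by a single-pass greedy two-pointer subsequence test per candidate (lcs(f,c)==f iff f is a subsequence of c), collecting the matches and returning the unique one.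
import Mathlib
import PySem

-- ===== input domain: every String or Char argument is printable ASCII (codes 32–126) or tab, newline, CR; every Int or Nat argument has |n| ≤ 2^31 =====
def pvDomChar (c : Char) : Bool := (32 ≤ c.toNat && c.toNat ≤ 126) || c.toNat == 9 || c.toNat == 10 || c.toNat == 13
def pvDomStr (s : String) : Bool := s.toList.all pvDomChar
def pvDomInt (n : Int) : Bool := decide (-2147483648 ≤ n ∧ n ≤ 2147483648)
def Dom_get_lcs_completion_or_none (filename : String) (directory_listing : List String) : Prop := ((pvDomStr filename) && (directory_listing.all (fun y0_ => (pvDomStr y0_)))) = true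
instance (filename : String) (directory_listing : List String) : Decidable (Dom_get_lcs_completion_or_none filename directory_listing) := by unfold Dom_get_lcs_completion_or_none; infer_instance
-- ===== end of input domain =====

-- B replaces the O(|f|·|c|) LCS dynamic-programming table + backtrack per candidate by a
-- single-pass greedy two-pointer subsequence test (lcs(f,c)==f iff f is a subsequence of c),
-- collecting the matches and returning the unique one; objective: faster.

-- ===== PORT A =====
-- lengths[i][j] (Python 2-D list read/write; indices always in range in A)
def pvGet2 (t : List (List Nat)) (i j : Nat) : Nat := (t.getD i []).getD j 0
def pvSet2 (t : List (List Nat)) (i j : Nat) (v : Nat) : List (List Nat) :=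
  t.set i ((t.getD i []).set j v)

-- the two nested 'for i, x in enumerate(A) / for j, y in enumerate(B)' loops filling `lengths`;
-- ported as folds over the index ranges, reading x = A[i], y = B[j] at each step
def pvLcsTable (a b : List Char) : List (List Nat) :=
  (List.range a.length).foldl
    (fun t i =>
      (List.range b.length).foldl
        (fun t j =>
          pvSet2 t (i + 1) (j + 1)
            (if a.getD i ' ' = b.getD j ' ' then pvGet2 t i j + 1
             else max (pvGet2 t (i + 1) j) (pvGet2 t i (j + 1))))
        t)
    ((List.range (a.length + 1)).map (fun _ => (List.range (b.length + 1)).map (fun _ => 0)))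

-- the 'while x != 0 and y != 0' backtrack; `result` carried as the List Char r (prepending chars)
def pvLcsBack (a : List Char) (t : List (List Nat)) (x y : Nat) (r : List Char) : List Char :=
  if h : x ≠ 0 ∧ y ≠ 0 then
    if pvGet2 t x y = pvGet2 t (x - 1) y then pvLcsBack a t (x - 1) y r
    else if pvGet2 t x y = pvGet2 t x (y - 1) then pvLcsBack a t x (y - 1) r
    else pvLcsBack a t (x - 1) (y - 1) (a.getD (x - 1) ' ' :: r)
  else r
termination_by x + y
decreasing_by all_goals omega

def pvLcs (A B : String) : String :=
  String.ofList
    (pvLcsBack A.toList (pvLcsTable A.toList B.toList) A.toList.length B.toList.length [])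

-- the candidate loop with `completion` accumulator and early 'return None' on a second match
def pvGoA (filename : String) : Option String → List String → Option String
  | comp, [] => comp
  | comp, c :: rest =>
    if pvLcs filename c = filename then
      match comp with
      | some _ => none
      | none => pvGoA filename (some c) rest
    else pvGoA filename comp rest

def get_lcs_completion_or_none (filename : String) (directory_listing : List String) : Option String :=
  pvGoA filename none directory_listing

-- ===== PORT B =====
-- two-pointer scan of `haystack`, advancing i while it matches needle[i]
def pvPtr (f c : List Char) : Nat :=
  c.foldl (fun i ch => if i < f.length ∧ f.getD i ' ' = ch then i + 1 else i) 0

def pvIsSubseq (f c : List Char) : Bool := pvPtr f c == f.length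

def get_lcs_completion_or_none_alt (filename : String) (directory_listing : List String) : Option String :=
  let ms := directory_listing.filter (fun c => pvIsSubseq filename.toList c.toList)
  if ms.length = 1 then ms.head? else none

-- ===== PRECONDITION & SPEC =====
def Spec_get_lcs_completion_or_none (filename : String) (directory_listing : List String) (out : Option String) : Prop := out = get_lcs_completion_or_none_alt filename directory_listing
instance (filename : String) (directory_listing : List String) (out : Option String) : Decidable (Spec_get_lcs_completion_or_none filename directory_listing out) := by unfold Spec_get_lcs_completion_or_none; infer_instance

-- ===== CLAIM (what is proved, stated in full; the proofs are below) =====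
def Claim_equal_get_lcs_completion_or_none : Prop := ∀ (filename : String) (directory_listing : List String), Dom_get_lcs_completion_or_none filename directory_listing → Spec_get_lcs_completion_or_none filename directory_listing (get_lcs_completion_or_none filename directory_listing)

-- ===== LEMMAS AND PROOFS =====

-- specification of the DP table cell: LCS length of a.take i and b.take j
def pvL (a b : List Char) (i j : Nat) : Nat :=
  if i = 0 ∨ j = 0 then 0
  else if a.getD (i - 1) ' ' = b.getD (j - 1) ' ' then pvL a b (i - 1) (j - 1) + 1
  else max (pvL a b i (j - 1)) (pvL a b (i - 1) j)
termination_by i + j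
decreasing_by all_goals omega

lemma pvL_zero_left (a b : List Char) (j : Nat) : pvL a b 0 j = 0 := by
  rw [pvL]; simp

lemma pvL_zero_right (a b : List Char) (i : Nat) : pvL a b i 0 = 0 := by
  rw [pvL]; simp

lemma pvL_succ (a b : List Char) (i j : Nat) :
    pvL a b (i + 1) (j + 1) =
      if a.getD i ' ' = b.getD j ' ' then pvL a b i j + 1
      else max (pvL a b (i + 1) j) (pvL a b i (j + 1)) := by
  rw [pvL]; simp

lemma pvL_le_left (a b : List Char) : ∀ (n i j : Nat), i + j ≤ n → pvL a b i j ≤ i := by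
  intro n
  induction n with
  | zero =>
    intro i j h
    obtain ⟨rfl, rfl⟩ : i = 0 ∧ j = 0 := by omega
    simp [pvL_zero_left]
  | succ n ih =>
    intro i j h
    match i, j with
    | 0, j => simp [pvL_zero_left]
    | i + 1, 0 => simp [pvL_zero_right]
    | i + 1, j + 1 =>
      rw [pvL_succ]
      split_ifs with hc
      · have := ih i j (by omega); omega
      · have h1 := ih (i + 1) j (by omega)
        have h2 := ih i (j + 1) (by omega)
        omega

-- monotonicity and unit-step bounds of pvL, proved together
lemma pvL_msb (a b : List Char) : ∀ (n i j : Nat), i + j ≤ n →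
    (pvL a b i j ≤ pvL a b (i + 1) j) ∧ (pvL a b i j ≤ pvL a b i (j + 1)) ∧
    (pvL a b (i + 1) j ≤ pvL a b i j + 1) ∧ (pvL a b i (j + 1) ≤ pvL a b i j + 1) := by
  intro n
  induction n with
  | zero =>
    intro i j h
    obtain ⟨rfl, rfl⟩ : i = 0 ∧ j = 0 := by omega
    simp [pvL_zero_left, pvL_zero_right]
  | succ n ih =>
    intro i j h
    refine ⟨?_, ?_, ?_, ?_⟩
    · -- pvL i j ≤ pvL (i+1) j
      match i, j with
      | i, 0 => simp [pvL_zero_right]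
      | 0, q + 1 => simp [pvL_zero_left]
      | p + 1, q + 1 =>
        rw [pvL_succ a b (p + 1) q]
        split_ifs with hc
        · exact Nat.le_trans ((ih (p + 1) q (by omega)).2.2.2) (by omega)
        · exact le_max_right _ _
    · -- pvL i j ≤ pvL i (j+1)
      match i, j with
      | 0, j => simp [pvL_zero_left]
      | p + 1, 0 => simp [pvL_zero_right]
      | p + 1, q + 1 =>
        rw [pvL_succ a b p (q + 1)]
        split_ifs with hc
        · exact Nat.le_trans ((ih p (q + 1) (by omega)).2.2.1) (by omega)
        · exact le_max_left _ _
    · -- pvL (i+1) j ≤ pvL i j + 1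
      match j with
      | 0 => simp [pvL_zero_right]
      | q + 1 =>
        rw [pvL_succ a b i q]
        split_ifs with hc
        · have := (ih i q (by omega)).2.1
          omega
        · have h1 := (ih i q (by omega)).2.2.1
          have h2 := (ih i q (by omega)).2.1
          simp only [max_le_iff]
          omega
    · -- pvL i (j+1) ≤ pvL i j + 1
      match i, j with
      | 0, j => simp [pvL_zero_left]
      | p + 1, 0 =>
        rw [pvL_succ a b p 0]
        split_ifs with hc
        · simp [pvL_zero_right]
        · have := (ih p 0 (by omega)).2.2.2
          simp only [max_le_iff, pvL_zero_right] at *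
          omega
      | p + 1, q + 1 =>
        rw [pvL_succ a b p (q + 1)]
        split_ifs with hc
        · have := (ih p (q + 1) (by omega)).1
          omega
        · have h1 := (ih p (q + 1) (by omega)).2.2.2
          have h2 := (ih p (q + 1) (by omega)).1
          simp only [max_le_iff]
          omega

lemma pvL_mono_left (a b : List Char) (i j : Nat) : pvL a b i j ≤ pvL a b (i + 1) j :=
  (pvL_msb a b (i + j) i j le_rfl).1

lemma pvL_mono_right (a b : List Char) (i j : Nat) : pvL a b i j ≤ pvL a b i (j + 1) :=
  (pvL_msb a b (i + j) i j le_rfl).2.1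

-- any common subsequence of the prefixes is bounded by pvL
lemma pvL_ge_sublist (a b : List Char) : ∀ (n i j : Nat) (s : List Char), i + j ≤ n →
    i ≤ a.length → j ≤ b.length → List.Sublist s (a.take i) → List.Sublist s (b.take j) →
    s.length ≤ pvL a b i j := by
  intro n
  induction n with
  | zero =>
    intro i j s h hi hj hsa hsb
    obtain rfl : i = 0 := by omega
    obtain rfl : s = [] := List.eq_nil_of_sublist_nil (by simpa using hsa)
    simp
  | succ n ih =>
    intro i j s h hi hj hsa hsb
    match i, j with
    | 0, j =>
      obtain rfl : s = [] := List.eq_nil_of_sublist_nil (by simpa using hsa)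
      simp
    | i + 1, 0 =>
      obtain rfl : s = [] := List.eq_nil_of_sublist_nil (by simpa using hsb)
      simp
    | p + 1, q + 1 =>
      have hpa : p < a.length := hi
      have hqb : q < b.length := hj
      have hta : a.take (p + 1) = a.take p ++ [a[p]] := by
        rw [List.take_add_one, List.getElem?_eq_getElem hpa]; rfl
      have htb : b.take (q + 1) = b.take q ++ [b[q]] := by
        rw [List.take_add_one, List.getElem?_eq_getElem hqb]; rfl
      rw [hta] at hsa
      rcases List.sublist_append_iff.mp hsa with ⟨s₁, s₂, rfl, hs₁, hs₂⟩
      rcases List.sublist_singleton.mp hs₂ with rfl | rfl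
      · -- s does not use a[p]
        simp only [List.append_nil] at hsb ⊢
        have := ih p (q + 1) s₁ (by omega) (by omega) hj hs₁ hsb
        exact Nat.le_trans this (pvL_mono_left a b p (q + 1))
      · rw [htb] at hsb
        rcases List.sublist_append_iff.mp hsb with ⟨u₁, u₂, heq, hu₁, hu₂⟩
        rcases List.sublist_singleton.mp hu₂ with rfl | rfl
        · -- s does not use b[q]
          rw [List.append_nil] at heq
          have hsa' : List.Sublist (s₁ ++ [a[p]]) (a.take (p + 1)) := by
            rw [hta]; exact List.Sublist.append hs₁ (List.Sublist.refl _)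
          have := ih (p + 1) q (s₁ ++ [a[p]]) (by omega) (by omega) (by omega) hsa'
            (heq ▸ hu₁)
          exact Nat.le_trans this (pvL_mono_right a b (p + 1) q)
        · -- s ends with a[p] = b[q]
          obtain ⟨rfl, hch⟩ := List.append_inj' heq (by simp)
          have hch' : a[p] = b[q] := by simpa using hch
          have hlen := ih p q s₁ (by omega) (by omega) (by omega) hs₁ hu₁
          rw [pvL_succ, if_pos (by rw [List.getD_eq_getElem a ' ' hpa, List.getD_eq_getElem b ' ' hqb]; exact hch')]
          simp only [List.length_append, List.length_cons, List.length_nil]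
          omega

-- shape of the table: m+1 rows of length n+1 each
def pvShape (t : List (List Nat)) (m n : Nat) : Prop :=
  t.length = m + 1 ∧ ∀ k, (t.getD k []).length = n + 1 ∨ m + 1 ≤ k

lemma pv_getD_set_self {α : Type} (l : List α) (i : Nat) (x : α) (d : α) (h : i < l.length) :
    (l.set i x).getD i d = x := by
  rw [List.getD_eq_getElem?_getD, List.getElem?_set_self h]; rfl

lemma pv_getD_set_ne {α : Type} (l : List α) (i j : Nat) (x : α) (d : α) (h : i ≠ j) :
    (l.set i x).getD j d = l.getD j d := by
  rw [List.getD_eq_getElem?_getD, List.getElem?_set_ne h, ← List.getD_eq_getElem?_getD]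

lemma pv_getD_map_range {α : Type} (f : Nat → α) (d : α) (m p : Nat) (h : p < m) :
    ((List.range m).map f).getD p d = f p := by
  rw [List.getD_eq_getElem?_getD, List.getElem?_map, List.getElem?_range h]; rfl

lemma pv_getD_oob {α : Type} (l : List α) (p : Nat) (d : α) (h : l.length ≤ p) :
    l.getD p d = d := by
  rw [List.getD_eq_getElem?_getD, List.getElem?_eq_none h]; rfl

lemma pvGet2_set2 (t : List (List Nat)) (m n p q p' q' v : Nat)
    (hsh : pvShape t m n) (hp : p ≤ m) (hq : q ≤ n) :
    pvGet2 (pvSet2 t p q v) p' q' = if p' = p ∧ q' = q then v else pvGet2 t p' q' := by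
  have hlen : p < t.length := by rw [hsh.1]; omega
  have hrow : (t.getD p []).length = n + 1 := (hsh.2 p).resolve_right (by omega)
  unfold pvGet2 pvSet2
  by_cases hpp : p' = p
  · subst hpp
    rw [pv_getD_set_self _ _ _ _ hlen]
    by_cases hqq : q' = q
    · subst hqq
      rw [if_pos ⟨rfl, rfl⟩, pv_getD_set_self _ _ _ _ (by omega)]
    · rw [if_neg (by tauto), pv_getD_set_ne _ _ _ _ _ (fun h => hqq h.symm)]
  · rw [if_neg (by tauto), pv_getD_set_ne _ _ _ _ _ (fun h => hpp h.symm)]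

lemma pvShape_set2 (t : List (List Nat)) (m n p q v : Nat)
    (hsh : pvShape t m n) (hp : p ≤ m) : pvShape (pvSet2 t p q v) m n := by
  have hlen : p < t.length := by rw [hsh.1]; omega
  refine ⟨by simp [pvSet2, List.length_set, hsh.1], ?_⟩
  intro k
  rcases hsh.2 k with hk | hk
  · left
    by_cases hkp : k = p
    · subst hkp
      rw [pvSet2, pv_getD_set_self _ _ _ _ hlen, List.length_set]
      exact hk
    · rw [pvSet2, pv_getD_set_ne _ _ _ _ _ (fun h => hkp h.symm)]
      exact hk
  · right; exact hk

def pvInit (m n : Nat) : List (List Nat) :=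
  (List.range (m + 1)).map (fun _ => (List.range (n + 1)).map (fun _ => (0 : Nat)))

lemma pvShape_init (m n : Nat) : pvShape (pvInit m n) m n := by
  refine ⟨by simp [pvInit], ?_⟩
  intro k
  by_cases hk : k < m + 1
  · left
    rw [pvInit, pv_getD_map_range _ _ _ _ hk]
    simp
  · right; omega

lemma pvGet2_init (m n p q : Nat) : pvGet2 (pvInit m n) p q = 0 := by
  unfold pvGet2 pvInit
  by_cases hp : p < m + 1
  · rw [pv_getD_map_range _ _ _ _ hp]
    by_cases hq : q < n + 1
    · rw [pv_getD_map_range _ _ _ _ hq]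
    · rw [pv_getD_oob _ _ _ (by rw [List.length_map, List.length_range]; omega)]
  · have h0 : ((List.range (m + 1)).map
        (fun _ => (List.range (n + 1)).map (fun _ => (0 : Nat)))).getD p [] = [] :=
      pv_getD_oob _ _ _ (by rw [List.length_map, List.length_range]; omega)
    rw [h0]
    rfl

-- invariant: rows 1..i filled, row i+1 filled up to column j, rest still 0
def pvInv (a b : List Char) (i j : Nat) (t : List (List Nat)) : Prop :=
  pvShape t a.length b.length ∧ ∀ p q, p ≤ a.length → q ≤ b.length →
    pvGet2 t p q =
      if (p ≠ 0 ∧ q ≠ 0) ∧ (p ≤ i ∨ (p = i + 1 ∧ q ≤ j)) then pvL a b p q else 0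

def pvStep (a b : List Char) (i : Nat) (t : List (List Nat)) (j : Nat) : List (List Nat) :=
  pvSet2 t (i + 1) (j + 1)
    (if a.getD i ' ' = b.getD j ' ' then pvGet2 t i j + 1
     else max (pvGet2 t (i + 1) j) (pvGet2 t i (j + 1)))

lemma pvLcsTable_eq (a b : List Char) :
    pvLcsTable a b =
      (List.range a.length).foldl
        (fun t i => (List.range b.length).foldl (pvStep a b i) t)
        (pvInit a.length b.length) := rfl

lemma pvInner_step (a b : List Char) (i j : Nat) (t : List (List Nat))
    (hi : i < a.length) (hj : j < b.length) (h : pvInv a b i j t) :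
    pvInv a b i (j + 1) (pvStep a b i t j) := by
  have g1 : pvGet2 t i j = pvL a b i j := by
    rw [h.2 i j (by omega) (by omega)]
    split_ifs with hc
    · rfl
    · have : i = 0 ∨ j = 0 := by omega
      rcases this with rfl | rfl <;> simp [pvL_zero_left, pvL_zero_right]
  have g2 : pvGet2 t (i + 1) j = pvL a b (i + 1) j := by
    rw [h.2 (i + 1) j (by omega) (by omega)]
    split_ifs with hc
    · rfl
    · have : j = 0 := by omega
      subst this; simp [pvL_zero_right]
  have g3 : pvGet2 t i (j + 1) = pvL a b i (j + 1) := by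
    rw [h.2 i (j + 1) (by omega) (by omega)]
    split_ifs with hc
    · rfl
    · have : i = 0 := by omega
      subst this; simp [pvL_zero_left]
  have hv : (if a.getD i ' ' = b.getD j ' ' then pvGet2 t i j + 1
      else max (pvGet2 t (i + 1) j) (pvGet2 t i (j + 1))) = pvL a b (i + 1) (j + 1) := by
    rw [g1, g2, g3, pvL_succ]
  refine ⟨pvShape_set2 _ _ _ _ _ _ h.1 (by omega), ?_⟩
  intro p q hp hq
  rw [pvStep, pvGet2_set2 t a.length b.length (i + 1) (j + 1) p q _ h.1 (by omega) (by omega), hv]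
  split_ifs with hd hc hc
  · rw [hd.1, hd.2]
  · exfalso; omega
  · rw [h.2 p q hp hq]
    split_ifs with hold
    · rfl
    · exfalso; omega
  · rw [h.2 p q hp hq]
    split_ifs with hold
    · exfalso; omega
    · rfl

lemma pvInner_fold (a b : List Char) (i : Nat) (hi : i < a.length) :
    ∀ (j : Nat) (t : List (List Nat)), j ≤ b.length → pvInv a b i 0 t →
      pvInv a b i j ((List.range j).foldl (pvStep a b i) t) := by
  intro j
  induction j with
  | zero => intro t _ ht; simpa using ht
  | succ j ihj =>
    intro t hj ht
    rw [List.range_succ, List.foldl_append, List.foldl_cons, List.foldl_nil]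
    exact pvInner_step a b i j _ hi (by omega) (ihj t (by omega) ht)

lemma pvInv_shift (a b : List Char) (i : Nat) (t : List (List Nat))
    (h : pvInv a b i b.length t) : pvInv a b (i + 1) 0 t := by
  refine ⟨h.1, ?_⟩
  intro p q hp hq
  rw [h.2 p q hp hq]
  split_ifs with h1 h2 h2
  · rfl
  · exfalso; omega
  · exfalso; omega
  · rfl

lemma pvOuter_fold (a b : List Char) : ∀ (i : Nat), i ≤ a.length →
    pvInv a b i 0
      ((List.range i).foldl (fun t i => (List.range b.length).foldl (pvStep a b i) t)
        (pvInit a.length b.length)) := by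
  intro i
  induction i with
  | zero =>
    intro _
    rw [List.range_zero, List.foldl_nil]
    refine ⟨pvShape_init _ _, ?_⟩
    intro p q hp hq
    rw [pvGet2_init, if_neg (by omega)]
  | succ i ihi =>
    intro hi
    rw [List.range_succ, List.foldl_append, List.foldl_cons, List.foldl_nil]
    exact pvInv_shift a b i _
      (pvInner_fold a b i (by omega) b.length _ le_rfl (ihi (by omega)))

lemma pvTable_correct (a b : List Char) (p q : Nat) (hp : p ≤ a.length) (hq : q ≤ b.length) :
    pvGet2 (pvLcsTable a b) p q = pvL a b p q := by
  have h := pvOuter_fold a b a.length le_rfl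
  rw [pvLcsTable_eq]
  rw [h.2 p q hp hq]
  split_ifs with hc
  · rfl
  · have : p = 0 ∨ q = 0 := by omega
    rcases this with rfl | rfl <;> simp [pvL_zero_left, pvL_zero_right]

-- the backtrack produces a common subsequence of the prefixes of length pvL x y, prepended to r
lemma pvBack_spec (a b : List Char) (t : List (List Nat))
    (ht : ∀ p q, p ≤ a.length → q ≤ b.length → pvGet2 t p q = pvL a b p q) :
    ∀ (n x y : Nat) (r : List Char), x + y ≤ n → x ≤ a.length → y ≤ b.length →
    ∃ s, pvLcsBack a t x y r = s ++ r ∧ s.length = pvL a b x y ∧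
      List.Sublist s (a.take x) ∧ List.Sublist s (b.take y) := by
  intro n
  induction n with
  | zero =>
    intro x y r h hx hy
    obtain ⟨rfl, rfl⟩ : x = 0 ∧ y = 0 := by omega
    refine ⟨[], ?_, by simp [pvL_zero_left], List.nil_sublist _, List.nil_sublist _⟩
    rw [pvLcsBack]; simp
  | succ n ih =>
    intro x y r h hx hy
    match x, y with
    | 0, y =>
      refine ⟨[], ?_, by simp [pvL_zero_left], List.nil_sublist _, List.nil_sublist _⟩
      rw [pvLcsBack]; simp
    | x + 1, 0 =>
      refine ⟨[], ?_, by simp [pvL_zero_right], List.nil_sublist _, List.nil_sublist _⟩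
      rw [pvLcsBack]; simp
    | p + 1, q + 1 =>
      have hpa : p < a.length := hx
      have hqb : q < b.length := hy
      rw [pvLcsBack, dif_pos ⟨Nat.succ_ne_zero p, Nat.succ_ne_zero q⟩]
      simp only [Nat.add_sub_cancel]
      rw [ht (p + 1) (q + 1) hx hy, ht p (q + 1) (by omega) hy, ht (p + 1) q hx (by omega)]
      split_ifs with h1 h2
      · obtain ⟨s, hs1, hs2, hs3, hs4⟩ := ih p (q + 1) r (by omega) (by omega) hy
        exact ⟨s, hs1, by rw [hs2, ← h1],
          hs3.trans (List.take_sublist_take_left (by omega)), hs4⟩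
      · obtain ⟨s, hs1, hs2, hs3, hs4⟩ := ih (p + 1) q r (by omega) hx (by omega)
        exact ⟨s, hs1, by rw [hs2, ← h2], hs3,
          hs4.trans (List.take_sublist_take_left (by omega))⟩
      · have hkey : a.getD p ' ' = b.getD q ' ' ∧ pvL a b (p + 1) (q + 1) = pvL a b p q + 1 := by
          by_cases hc : a.getD p ' ' = b.getD q ' '
          · exact ⟨hc, by rw [pvL_succ, if_pos hc]⟩
          · exfalso
            have hm := pvL_succ a b p q
            rw [if_neg hc] at hm
            rcases max_choice (pvL a b (p + 1) q) (pvL a b p (q + 1)) with hmc | hmc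
            · rw [hmc] at hm; exact h2 hm
            · rw [hmc] at hm; exact h1 hm
        obtain ⟨s, hs1, hs2, hs3, hs4⟩ := ih p q (a.getD p ' ' :: r) (by omega) (by omega) (by omega)
        have hgp : a.getD p ' ' = a[p] := List.getD_eq_getElem a ' ' hpa
        have hgq : b.getD q ' ' = b[q] := List.getD_eq_getElem b ' ' hqb
        have hta : a.take (p + 1) = a.take p ++ [a[p]] := by
          rw [List.take_add_one, List.getElem?_eq_getElem hpa]; rfl
        have htb : b.take (q + 1) = b.take q ++ [b[q]] := by
          rw [List.take_add_one, List.getElem?_eq_getElem hqb]; rfl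
        refine ⟨s ++ [a.getD p ' '], ?_, ?_, ?_, ?_⟩
        · rw [hs1]; simp
        · rw [List.length_append, hs2, hkey.2]; simp
        · rw [hta, hgp]
          exact List.Sublist.append hs3 (List.Sublist.refl _)
        · rw [htb, hkey.1, hgq]
          exact List.Sublist.append hs4 (List.Sublist.refl _)

lemma pvLcs_eq_iff (A B : String) : pvLcs A B = A ↔ List.Sublist A.toList B.toList := by
  obtain ⟨s, hs1, hs2, hs3, hs4⟩ :=
    pvBack_spec A.toList B.toList (pvLcsTable A.toList B.toList)
      (fun p q hp hq => pvTable_correct A.toList B.toList p q hp hq)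
      (A.toList.length + B.toList.length) A.toList.length B.toList.length [] le_rfl le_rfl le_rfl
  rw [List.append_nil] at hs1
  rw [List.take_length] at hs3 hs4
  unfold pvLcs
  rw [hs1]
  constructor
  · intro h
    have hsa : s = A.toList := by
      apply String.ofList_inj.mp
      rw [h]; simp
    rw [← hsa]; exact hs4
  · intro hsub
    have hlen : pvL A.toList B.toList A.toList.length B.toList.length = A.toList.length :=
      Nat.le_antisymm (pvL_le_left A.toList B.toList _ _ _ le_rfl)
        (pvL_ge_sublist A.toList B.toList (A.toList.length + B.toList.length) _ _ A.toList
          le_rfl le_rfl le_rfl (by rw [List.take_length]) (by rw [List.take_length]; exact hsub))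
    have hsa : s = A.toList := (List.Sublist.length_eq hs3).mp (by rw [hs2, hlen])
    rw [hsa]; simp

lemma pvPtr_go (f : List Char) : ∀ (c : List Char) (i : Nat), i ≤ f.length →
    (c.foldl (fun i ch => if i < f.length ∧ f.getD i ' ' = ch then i + 1 else i) i = f.length ↔
      List.Sublist (f.drop i) c) := by
  intro c
  induction c with
  | nil =>
    intro i hi
    simp only [List.foldl_nil, List.sublist_nil, List.drop_eq_nil_iff]
    omega
  | cons ch c ihc =>
    intro i hi
    rw [List.foldl_cons]
    by_cases hilt : i < f.length
    · have hdrop : f.drop i = f[i] :: f.drop (i + 1) := List.drop_eq_getElem_cons hilt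
      have hgd : f.getD i ' ' = f[i] := List.getD_eq_getElem f ' ' hilt
      by_cases hch : f.getD i ' ' = ch
      · rw [if_pos ⟨hilt, hch⟩, ihc (i + 1) (by omega), hdrop]
        rw [show f[i] = ch from hgd ▸ hch]
        exact (List.cons_sublist_cons).symm
      · rw [if_neg (by tauto), ihc i (by omega), hdrop]
        constructor
        · intro hsub
          exact List.Sublist.cons ch hsub
        · intro hsub
          rcases List.sublist_cons_iff.mp hsub with hs | ⟨rr, hrr, _⟩
          · exact hs
          · exfalso
            injection hrr with h3 _
            exact hch (hgd.trans h3)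
    · have hieq : i = f.length := by omega
      subst hieq
      rw [if_neg (by rintro ⟨h1, -⟩; omega)]
      rw [ihc f.length le_rfl]
      simp [List.drop_length]

lemma pvIsSubseq_iff (f c : List Char) : pvIsSubseq f c = true ↔ List.Sublist f c := by
  have h := pvPtr_go f c 0 (Nat.zero_le _)
  simp only [List.drop_zero] at h
  simpa [pvIsSubseq, pvPtr] using h

lemma pvGoA_some (f c : String) : ∀ l, pvGoA f (some c) l =
    if l.filter (fun x => decide (pvLcs f x = f)) = [] then some c else none := by
  intro l
  induction l with
  | nil => simp [pvGoA]
  | cons x l ih =>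
    by_cases h : pvLcs f x = f
    · simp [pvGoA, h]
    · simp [pvGoA, h, ih]

lemma pvGoA_none (f : String) : ∀ l, pvGoA f none l =
    (if (l.filter (fun x => decide (pvLcs f x = f))).length = 1 then
      (l.filter (fun x => decide (pvLcs f x = f))).head? else none) := by
  intro l
  induction l with
  | nil => simp [pvGoA]
  | cons x l ih =>
    by_cases h : pvLcs f x = f
    · rw [show pvGoA f none (x :: l) = pvGoA f (some x) l by simp [pvGoA, h]]
      rw [pvGoA_some]
      by_cases hf : l.filter (fun x => decide (pvLcs f x = f)) = [] <;>
        simp [h, hf]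
    · simp [pvGoA, h, ih]

-- ===== VERDICT (by name: the statement is the Claim_ definition above) =====
theorem get_lcs_completion_or_none_spec : Claim_equal_get_lcs_completion_or_none := by
  intro f l _
  unfold Spec_get_lcs_completion_or_none get_lcs_completion_or_none get_lcs_completion_or_none_alt
  rw [pvGoA_none]
  have hcongr : ∀ x ∈ l, (decide (pvLcs f x = f)) = pvIsSubseq f.toList x.toList := by
    intro x _
    rw [Bool.eq_iff_iff]
    simp [pvLcs_eq_iff, pvIsSubseq_iff]
  rw [List.filter_congr hcongr]
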